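-- pv_equiv track=rewrite | github.com/DreamLab-AI/agentbox | skills/docs-alignment/scripts/detect_ascii.py | _is_in_code_block
-- ===== SOURCE A (Python) =====
-- from typing import Dict, List, Optional, Set, Tuple
--
-- def _is_in_code_block(
--
--     file_lines: List[str],
--     start_idx: int,
--     end_idx: int
-- ) -> bool:
--     """Check if region is within a code block."""
--     in_block = False
--     for i, line in enumerate(file_lines):
--         if i > end_idx:
--             break
--         if line.strip().startswith('```'):
--             in_block = not in_block
--         if i >= start_idx and in_block:
--             return True
--     return False
-- ===== SOURCE B (Python) =====
-- def _is_in_code_block(file_lines, start_idx, end_idx):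
--     """Check if region is within a code block."""
--     lo = max(start_idx, 0)
--     hi = min(end_idx, len(file_lines) - 1)
--     if lo > hi:
--         return False
--     # collect fence line indices once, pair them into code-block intervals
--     # [open, close) (an unmatched last fence opens a block to end of file;
--     # the opening fence line itself counts as inside, the closing one does not),
--     # and test whether any interval intersects [lo, hi].
--     fences = [i for i, line in enumerate(file_lines) if line.strip().startswith('```')]
--     k = 0
--     while k < len(fences):
--         opened = fences[k]
--         closed = fences[k + 1] if k + 1 < len(fences) else len(file_lines)
--         if opened <= hi and lo < closed:
--             return True
--         k += 2
--     return False
-- ===== Notes on version B (the rewrite author's own statement) =====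
-- stated objective: alternative
-- what changed: B has no in_block toggle scan at all: it extracts the fence line indices once, pairs them into code-block intervals [open, close) (unmatched trailing fence closes at end of file), and returns whether any interval intersects the clamped query range [lo, hi] - an interval-intersection formulation instead of A's stateful line-by-line parity scan.
import Mathlib
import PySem

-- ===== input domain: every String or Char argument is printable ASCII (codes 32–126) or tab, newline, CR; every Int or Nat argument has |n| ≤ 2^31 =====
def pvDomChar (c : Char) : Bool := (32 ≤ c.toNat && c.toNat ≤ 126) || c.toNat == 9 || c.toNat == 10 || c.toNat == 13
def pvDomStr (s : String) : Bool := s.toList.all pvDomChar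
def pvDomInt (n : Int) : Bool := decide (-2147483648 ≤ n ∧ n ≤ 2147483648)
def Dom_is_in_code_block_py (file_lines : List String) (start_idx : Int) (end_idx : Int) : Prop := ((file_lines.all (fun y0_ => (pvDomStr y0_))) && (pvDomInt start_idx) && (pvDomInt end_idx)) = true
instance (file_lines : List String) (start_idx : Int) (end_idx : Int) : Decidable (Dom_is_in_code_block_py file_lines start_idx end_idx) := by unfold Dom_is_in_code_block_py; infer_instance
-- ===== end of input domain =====

-- B replaces A's stateful toggle scan by computing the fence index list once, pairing it into
-- code-block intervals, and testing interval intersection with the clamped region (objective: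
-- alternative algorithm, not faster).

-- ===== PORT A =====
-- line.strip().startswith('```')
def pvFence (line : String) : Bool := PySem.Str.startswith (PySem.Str.strip line) "```"

-- A's for-loop over enumerate(file_lines) with the break and the early return
def pvGoA : List String → Nat → Bool → Int → Int → Bool
  | [], _, _, _, _ => false
  | l :: rest, i, inb, s, e =>
    if (i : Int) > e then false
    else
      let inb' := if pvFence l then !inb else inb
      if decide ((i : Int) ≥ s) && inb' then true
      else pvGoA rest (i + 1) inb' s e

def is_in_code_block_py (file_lines : List String) (start_idx : Int) (end_idx : Int) : Bool :=
  pvGoA file_lines 0 false start_idx end_idx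

-- ===== PORT B =====
-- Source B's list comprehension: fence indices via enumerate
def pvFencesB (file_lines : List String) : List Int :=
  (PySem.List.enumerate file_lines 0).filterMap (fun p => if pvFence p.2 then some p.1 else none)

-- Source B's while loop over k with step 2: consume the fence list two indices at a time
def pvPairsB : List Int → Int → Int → Int → Bool
  | [], _, _, _ => false
  | [o], n, lo, hi => decide (o ≤ hi ∧ lo < n)
  | o :: c :: rest, n, lo, hi => if o ≤ hi ∧ lo < c then true else pvPairsB rest n lo hi

def is_in_code_block_py_alt (file_lines : List String) (start_idx : Int) (end_idx : Int) : Bool :=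
  let lo := max start_idx 0
  let hi := min end_idx ((file_lines.length : Int) - 1)
  if lo > hi then false
  else pvPairsB (pvFencesB file_lines) (file_lines.length : Int) lo hi

-- ===== PRECONDITION & SPEC =====
def Spec_is_in_code_block_py (file_lines : List String) (start_idx : Int) (end_idx : Int) (out : Bool) : Prop := out = is_in_code_block_py_alt file_lines start_idx end_idx
instance (file_lines : List String) (start_idx : Int) (end_idx : Int) (out : Bool) : Decidable (Spec_is_in_code_block_py file_lines start_idx end_idx out) := by unfold Spec_is_in_code_block_py; infer_instance

-- ===== CLAIM (what is proved, stated in full; the proofs are below) =====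
def Claim_equal_is_in_code_block_py : Prop := ∀ (file_lines : List String) (start_idx : Int) (end_idx : Int), Dom_is_in_code_block_py file_lines start_idx end_idx → Spec_is_in_code_block_py file_lines start_idx end_idx (is_in_code_block_py file_lines start_idx end_idx)

-- ===== LEMMAS AND PROOFS =====

-- fence indices of l, where l starts at absolute index i
def pvFencesIdx : List String → Nat → List Int
  | [], _ => []
  | x :: t, i => if pvFence x then (i : Int) :: pvFencesIdx t (i + 1) else pvFencesIdx t (i + 1)

lemma pvFencesB_eq (l : List String) : ∀ (i : Nat),
    (PySem.List.enumerate l (i : Int)).filterMap (fun p => if pvFence p.2 then some p.1 else none)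
      = pvFencesIdx l i := by
  induction l with
  | nil => intro i; simp [PySem.List.enumerate_nil, pvFencesIdx]
  | cons x t ih =>
    intro i
    rw [PySem.List.enumerate_cons]
    have hcast : ((i : Int) + 1) = ((i + 1 : Nat) : Int) := by push_cast; ring
    rw [List.filterMap_cons, hcast, ih (i + 1), pvFencesIdx]
    by_cases h : pvFence x <;> simp [h]

lemma pvFencesIdx_ge (l : List String) : ∀ (i : Nat), ∀ o ∈ pvFencesIdx l i, (i : Int) ≤ o := by
  induction l with
  | nil => intro i o ho; simp [pvFencesIdx] at ho
  | cons x t ih =>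
    intro i o ho
    rw [pvFencesIdx] at ho
    by_cases h : pvFence x
    · rw [if_pos h] at ho
      rcases List.mem_cons.mp ho with rfl | ho
      · exact le_refl _
      · have := ih (i + 1) o ho; push_cast at this ⊢; omega
    · rw [if_neg h] at ho
      have := ih (i + 1) o ho; push_cast at this ⊢; omega

-- pvPairsB is false when every fence index exceeds hi
lemma pvPairsB_false : ∀ (fs : List Int) (n lo hi : Int),
    (∀ o ∈ fs, hi < o) → pvPairsB fs n lo hi = false
  | [], _, _, _, _ => rfl
  | [o], n, lo, hi, h => by
    have := h o (by simp)
    simp [pvPairsB]; omega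
  | o :: c :: rest, n, lo, hi, h => by
    have ho := h o (by simp)
    rw [pvPairsB, if_neg (by omega)]
    exact pvPairsB_false rest n lo hi (fun x hx => h x (by simp [hx]))

-- Source B's loop in the "inside an open block" state: the head of fs is the closing fence
def pvPairsOpen : List Int → Int → Int → Int → Bool
  | [], _, _, _ => true
  | c :: rest, n, lo, hi => if lo < c then true else pvPairsB rest n lo hi

lemma pvPairsB_cons_open (fs : List Int) (n lo hi o : Int)
    (h1 : o ≤ hi) (h2 : lo ≤ hi) (h3 : hi < n) :
    pvPairsB (o :: fs) n lo hi = pvPairsOpen fs n lo hi := by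
  cases fs with
  | nil =>
    rw [pvPairsB, pvPairsOpen]
    simp; omega
  | cons c rest =>
    rw [pvPairsB, pvPairsOpen]
    by_cases hc : lo < c
    · rw [if_pos ⟨h1, hc⟩, if_pos hc]
    · rw [if_neg (by tauto), if_neg hc]

-- main invariant: A's scan from absolute index i equals the interval check on the remaining fences,
-- both out of a block (flag false) and inside an open block (flag true, scan index still ≤ lo)
lemma pvMain (s e lo : Int) (hlo : lo = max s 0) : ∀ (l : List String) (i : Nat) (n hi : Int),
    n = (i : Int) + l.length → hi = min e (n - 1) →
    (lo ≤ hi → pvGoA l i false s e = pvPairsB (pvFencesIdx l i) n lo hi)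
    ∧ ((i : Int) ≤ lo → lo ≤ hi → pvGoA l i true s e = pvPairsOpen (pvFencesIdx l i) n lo hi) := by
  intro l
  induction l with
  | nil =>
    intro i n hi hn hhi
    refine ⟨fun h => ?_, fun hile h => ?_⟩
    · rw [pvGoA, pvFencesIdx, pvPairsB]
    · simp at hn; omega
  | cons x t ih =>
    intro i n hi hn hhi
    have hlen : ((x :: t).length : Int) = (t.length : Int) + 1 := by push_cast [List.length_cons]; ring
    have hn' : n = ((i + 1 : Nat) : Int) + t.length := by rw [hn, hlen]; push_cast; ring
    have ihspec := ih (i + 1) n hi hn' hhi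
    constructor
    · -- out-of-block state
      intro hlohi
      by_cases hbreak : (i : Int) > e
      · -- A breaks; all remaining fences are > hi
        rw [pvGoA, if_pos hbreak]
        rw [pvPairsB_false _ _ _ _ (fun o ho => by
          have := pvFencesIdx_ge (x :: t) i o ho; omega)]
      · rw [pvGoA, if_neg hbreak]
        by_cases hf : pvFence x
        · -- fence line at i: opens a block
          rw [pvFencesIdx, if_pos hf]
          simp only [hf, if_true, Bool.not_false]
          have hii : (i : Int) ≤ hi := by rw [hn, hlen] at hhi; omega
          by_cases hs : (i : Int) ≥ s
          · -- the opening fence itself is in range: both sides true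
            have hgate : (decide ((i : Int) ≥ s) && true) = true := by simp [hs]
            rw [hgate, if_pos rfl]
            cases hrest : pvFencesIdx t (i + 1) with
            | nil =>
              rw [pvPairsB]
              simp
              refine ⟨hii, by rw [hn, hlen] at hhi; omega⟩
            | cons c rest =>
              have hc := pvFencesIdx_ge t (i + 1) c (by rw [hrest]; simp)
              rw [pvPairsB, if_pos ⟨hii, by push_cast at hc; omega⟩]
          · -- fence before the region: switch to the open-block state
            have hgate : (decide ((i : Int) ≥ s) && true) = false := by simp; omega
            rw [hgate]
            simp only [Bool.false_eq_true, if_false]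
            rw [pvPairsB_cons_open _ _ _ _ _ hii hlohi (by omega)]
            exact ihspec.2 (by push_cast; omega) hlohi
        · -- not a fence, flag stays false: nothing reported here
          rw [pvFencesIdx, if_neg hf]
          simp only [hf, if_false, Bool.and_false, Bool.false_eq_true]
          exact ihspec.1 hlohi
    · -- open-block state, i ≤ lo
      intro hile hlohi
      have hbreak : ¬ ((i : Int) > e) := by omega
      rw [pvGoA, if_neg hbreak]
      by_cases hf : pvFence x
      · -- closing fence at i: flag goes false, back to paired scanning
        rw [pvFencesIdx, if_pos hf]
        simp only [hf, if_true, Bool.not_true, Bool.and_false, Bool.false_eq_true]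
        rw [if_neg (by simp)]
        simp only [pvPairsOpen]
        rw [if_neg (by omega)]
        exact ihspec.1 hlohi
      · rw [pvFencesIdx, if_neg hf]
        simp only [hf, Bool.false_eq_true, if_false]
        by_cases hs : (i : Int) ≥ s
        · -- inside the block and inside the region: both sides true
          have hgate : (decide ((i : Int) ≥ s) && true) = true := by simp [hs]
          rw [hgate, if_pos rfl]
          have hieq : (i : Int) = lo := by omega
          cases hrest : pvFencesIdx t (i + 1) with
          | nil => rfl
          | cons c rest =>
            have hc := pvFencesIdx_ge t (i + 1) c (by rw [hrest]; simp)
            simp only [pvPairsOpen]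
            rw [if_pos (by push_cast at hc; omega)]
        · have hgate : (decide ((i : Int) ≥ s) && true) = false := by simp; omega
          rw [hgate]
          simp only [Bool.false_eq_true, if_false]
          exact ihspec.2 (by push_cast; omega) hlohi

-- A returns False when the break fires before any reportable index: e < s
lemma pvGoA_empty (s e : Int) (he : e < s) : ∀ (l : List String) (i : Nat) (inb : Bool),
    pvGoA l i inb s e = false := by
  intro l
  induction l with
  | nil => intro i inb; rfl
  | cons x xs ih =>
    intro i inb
    rw [pvGoA]
    split
    · rfl
    · have hlt : decide ((i : Int) ≥ s) = false := by
        simp only [decide_eq_false_iff_not, ge_iff_le, not_le]; omega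
      rw [hlt]
      simp only [Bool.false_and, Bool.false_eq_true, if_false]
      exact ih (i + 1) _

-- A returns False when the region starts past the end of the file
lemma pvGoA_past (s e : Int) : ∀ (l : List String) (i : Nat) (inb : Bool),
    ((i : Int) + l.length) ≤ s → pvGoA l i inb s e = false := by
  intro l
  induction l with
  | nil => intro i inb _; rfl
  | cons x xs ih =>
    intro i inb h
    rw [pvGoA]
    split
    · rfl
    · have hlt : decide ((i : Int) ≥ s) = false := by
        simp only [decide_eq_false_iff_not, ge_iff_le, not_le]
        simp at h; push_cast at h; omega
      rw [hlt]
      simp only [Bool.false_and, Bool.false_eq_true, if_false]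
      exact ih (i + 1) _ (by simp at h ⊢; push_cast at h ⊢; omega)

-- ===== VERDICT (by name: the statement is the Claim_ definition above) =====
theorem is_in_code_block_py_spec : Claim_equal_is_in_code_block_py := by
  intro fl s e _
  unfold Spec_is_in_code_block_py is_in_code_block_py
  have hB : is_in_code_block_py_alt fl s e =
      if max s 0 > min e ((fl.length : Int) - 1) then false
      else pvPairsB (pvFencesB fl) (fl.length : Int) (max s 0) (min e ((fl.length : Int) - 1)) := rfl
  rw [hB]
  by_cases hdeg : max s 0 > min e ((fl.length : Int) - 1)
  · rw [if_pos hdeg]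
    -- the clamped region is empty: either e < s, or e < 0, or the region starts past the end
    by_cases hes : e < s
    · exact pvGoA_empty s e hes fl 0 false
    · by_cases he0 : e < 0
      · cases fl with
        | nil => rfl
        | cons y t => rw [pvGoA, if_pos (by omega)]
      · cases fl with
        | nil => rfl
        | cons y t =>
          refine pvGoA_past s e (y :: t) 0 false ?_
          by_contra hcon
          apply absurd hdeg
          push_neg at hcon ⊢
          have hse : s ≤ e := by omega
          have h0e : (0 : Int) ≤ e := by omega
          have hlen : (0 : Int) ≤ (((y :: t).length : Nat) : Int) - 1 := by
            have h1 : 1 ≤ (y :: t).length := by simp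
            omega
          have hsl : s ≤ (((y :: t).length : Nat) : Int) - 1 := by
            push_cast at hcon ⊢
            omega
          exact max_le (le_min hse hsl) (le_min h0e hlen)
  · rw [if_neg hdeg]
    have hfl : pvFencesB fl = pvFencesIdx fl 0 := by
      rw [pvFencesB]
      simpa using pvFencesB_eq fl 0
    rw [hfl]
    exact (pvMain s e (max s 0) rfl fl 0 (fl.length : Int) (min e ((fl.length : Int) - 1))
      (by push_cast; ring) rfl).1 (by omega)
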